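-- pv_equiv track=rewrite | github.com/jeevan108065/weight-lifting-score-management-software | infosys 2.py | calculateMaxSum
-- ===== SOURCE A (Python) =====
-- def calculateMaxSum(N,Arr):
--     List=[]
--     Sum=[]
--     for i in range(N):
--         for j in range(i,N+1):
--             a=[]
--             b=[]
--             if i>0:
--                 b=Arr[:i]
--             a=Arr[i:j]
--             a.reverse()
--             List=b+a+Arr[j:]
--             c=0
--             for k in range(len(List)):
--                 if k%2!=0:
--                     c=c+List[k]
--             Sum.append(c)
--     return max(Sum)
-- ===== SOURCE B (Python) =====
-- def calculateMaxSum(N, Arr):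
--     L = len(Arr)
--     # prefix sums of even-index and odd-index elements
--     E = [0]; O = [0]
--     e = 0; o = 0
--     for k, v in enumerate(Arr):
--         if k % 2 == 0:
--             e += v
--         else:
--             o += v
--         E.append(e)
--         O.append(o)
--     base = o  # odd-index sum of the untouched array (empty reversal)
--     best = base
--     for i in range(N):
--         for j in range(i, N + 1):
--             ii = min(i, L); jj = min(j, L)  # Python slices clamp to the array
--             odd_seg = O[jj] - O[ii]
--             new_seg = odd_seg if (ii + jj) % 2 == 1 else E[jj] - E[ii]
--             t = base - odd_seg + new_seg
--             if t > best:
--                 best = t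
--     return best
-- ===== Notes on version B (the rewrite author's own statement) =====
-- stated objective: faster
-- what changed: B precomputes parity-split prefix sums once and evaluates each subarray reversal's odd-index sum in O(1) with a running max, instead of A's materialising every reversed list and rescanning it.
import Mathlib
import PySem

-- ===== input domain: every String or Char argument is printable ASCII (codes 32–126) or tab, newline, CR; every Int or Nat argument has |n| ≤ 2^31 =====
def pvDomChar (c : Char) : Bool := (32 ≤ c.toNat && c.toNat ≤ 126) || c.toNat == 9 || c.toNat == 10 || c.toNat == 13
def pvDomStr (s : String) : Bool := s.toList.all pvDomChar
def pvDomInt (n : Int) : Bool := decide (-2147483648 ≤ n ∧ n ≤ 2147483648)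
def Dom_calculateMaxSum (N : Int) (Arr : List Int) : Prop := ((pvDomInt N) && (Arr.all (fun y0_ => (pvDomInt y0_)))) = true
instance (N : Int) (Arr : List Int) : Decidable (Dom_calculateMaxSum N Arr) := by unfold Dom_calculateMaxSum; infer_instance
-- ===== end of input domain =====

-- B replaces A's "materialise every reversal and rescan it" (O(N^3)) by parity-split
-- prefix sums giving each reversal's odd-index sum in O(1) with a running max (O(N^2)).

-- ===== PORT A =====
def calculateMaxSum (N : Int) (Arr : List Int) : Int :=
  let Sum : List Int :=
    (PySem.List.pyRange 0 N 1).foldl (fun Sum i =>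
      (PySem.List.pyRange i (N + 1) 1).foldl (fun Sum j =>
        let b : List Int := if i > 0 then PySem.List.slice Arr none (some i) else []
        let a : List Int := (PySem.List.slice Arr (some i) (some j)).reverse
        let Lst : List Int := b ++ a ++ PySem.List.slice Arr (some j) none
        let c : Int :=
          (PySem.List.pyRange 0 (Lst.length : Int) 1).foldl
            (fun c k => if PySem.Int.mod k 2 ≠ 0 then c + PySem.List.pyGetD Lst k 0 else c) 0
        Sum ++ [c]) Sum) []
  (PySem.List.max? Sum (fun y => y)).getD 0

-- ===== PORT B =====
-- loop body of B's prefix-sum pass ('if k % 2 == 0: e += v else: o += v; E.append(e); O.append(o)')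
def pvStep (st : List Int × List Int × Int × Int) (kv : Int × Int) : List Int × List Int × Int × Int :=
  let eo : Int × Int :=
    if PySem.Int.mod kv.1 2 = 0 then (st.2.2.1 + kv.2, st.2.2.2) else (st.2.2.1, st.2.2.2 + kv.2)
  (st.1 ++ [eo.1], st.2.1 ++ [eo.2], eo.1, eo.2)

-- loop body of B's main double loop (the O(1) evaluation of one reversal)
def pvInner (E O : List Int) (base L : Int) (best i j : Int) : Int :=
  let ii := min i L
  let jj := min j L
  let odd_seg := PySem.List.pyGetD O jj 0 - PySem.List.pyGetD O ii 0
  let new_seg := if PySem.Int.mod (ii + jj) 2 = 1 then odd_seg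
    else PySem.List.pyGetD E jj 0 - PySem.List.pyGetD E ii 0
  let t := base - odd_seg + new_seg
  if t > best then t else best

def calculateMaxSum_alt (N : Int) (Arr : List Int) : Int :=
  let L : Int := (Arr.length : Int)
  let st := (PySem.List.enumerate Arr).foldl pvStep ([0], [0], 0, 0)
  let E := st.1
  let O := st.2.1
  let base := st.2.2.2
  (PySem.List.pyRange 0 N 1).foldl (fun best i =>
    (PySem.List.pyRange i (N + 1) 1).foldl (fun best j =>
      pvInner E O base L best i j) best) base

-- ===== PRECONDITION & SPEC =====
-- Pre_ excludes N ≤ 0: there A's Sum list stays empty and Python's max([]) raises ValueError.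
def Pre_calculateMaxSum (N : Int) (Arr : List Int) : Prop := 1 ≤ N
instance (N : Int) (Arr : List Int) : Decidable (Pre_calculateMaxSum N Arr) := by unfold Pre_calculateMaxSum; infer_instance
def pvWitness_calculateMaxSum : Int × List Int := (2, [1, -3, 5])

def Spec_calculateMaxSum (N : Int) (Arr : List Int) (out : Int) : Prop := out = calculateMaxSum_alt N Arr
instance (N : Int) (Arr : List Int) (out : Int) : Decidable (Spec_calculateMaxSum N Arr out) := by unfold Spec_calculateMaxSum; infer_instance

-- ===== CLAIM (what is proved, stated in full; the proofs are below) =====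
def Claim_equal_calculateMaxSum : Prop := ∀ (N : Int) (Arr : List Int), Dom_calculateMaxSum N Arr → Pre_calculateMaxSum N Arr → Spec_calculateMaxSum N Arr (calculateMaxSum N Arr)

-- ===== LEMMAS AND PROOFS =====

-- (even-position sum, odd-position sum) of a list
def pvPsum : List Int → Int × Int
  | [] => (0, 0)
  | x :: l => (x + (pvPsum l).2, (pvPsum l).1)

lemma pvPsum_append (a b : List Int) :
    pvPsum (a ++ b) = if a.length % 2 = 0
      then ((pvPsum a).1 + (pvPsum b).1, (pvPsum a).2 + (pvPsum b).2)
      else ((pvPsum a).1 + (pvPsum b).2, (pvPsum a).2 + (pvPsum b).1) := by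
  induction a with
  | nil => simp [pvPsum]
  | cons x a ih =>
      simp only [List.cons_append, pvPsum, ih, List.length_cons]
      rcases Nat.mod_two_eq_zero_or_one a.length with h | h <;>
        simp [h, Nat.succ_mod_two_eq_zero_iff, Nat.succ_mod_two_eq_one_iff, Prod.ext_iff] <;> omega

lemma pvPsum_reverse (a : List Int) :
    pvPsum a.reverse = if a.length % 2 = 0 then ((pvPsum a).2, (pvPsum a).1) else pvPsum a := by
  induction a with
  | nil => simp [pvPsum]
  | cons x a ih =>
      simp only [List.reverse_cons, pvPsum_append, ih, List.length_reverse, List.length_cons]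
      rcases Nat.mod_two_eq_zero_or_one a.length with h | h <;>
        simp [h, pvPsum, Nat.succ_mod_two_eq_zero_iff, Nat.succ_mod_two_eq_one_iff, Prod.ext_iff] <;> omega

-- A's inner index scan computes the odd-position sum
lemma pvOddScan (l : List Int) :
    (PySem.List.pyRange 0 (l.length : Int) 1).foldl
      (fun c k => if PySem.Int.mod k 2 ≠ 0 then c + PySem.List.pyGetD l k 0 else c) 0
      = (pvPsum l).2 := by
  induction l using List.reverseRecOn with
  | nil => simp [PySem.List.pyRange_one_eq_nil, pvPsum]
  | append_singleton l x ih =>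
      have hlen : (((l ++ [x]).length : Nat) : Int) = (l.length : Int) + 1 := by simp
      rw [hlen, PySem.List.pyRange_one_succ_right (by positivity), List.foldl_append]
      have hcongr : (PySem.List.pyRange 0 (l.length : Int) 1).foldl
          (fun c k => if PySem.Int.mod k 2 ≠ 0 then c + PySem.List.pyGetD (l ++ [x]) k 0 else c) 0
          = (PySem.List.pyRange 0 (l.length : Int) 1).foldl
          (fun c k => if PySem.Int.mod k 2 ≠ 0 then c + PySem.List.pyGetD l k 0 else c) 0 := by
        apply PySem.List.foldl_congr_mem
        intro acc k hk
        rw [PySem.List.mem_pyRange_one] at hk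
        have hkl : k.toNat < l.length := by omega
        rw [PySem.List.pyGetD_eq_getElem (l ++ [x]) 0 hk.1 (by simp; omega),
            PySem.List.pyGetD_eq_getElem l 0 hk.1 (by exact_mod_cast hk.2),
            List.getElem_append_left hkl]
      rw [hcongr, ih]
      have hx : PySem.List.pyGetD (l ++ [x]) (l.length : Int) 0 = x := by
        rw [PySem.List.pyGetD_eq_getElem (l ++ [x]) 0 (by positivity) (by simp)]
        simp
      simp only [List.foldl_cons, List.foldl_nil, hx, pvPsum_append,
        PySem.Int.mod_eq_emod_of_pos (by norm_num : (0:Int) < 2)]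
      rcases Nat.mod_two_eq_zero_or_one l.length with h | h <;>
        simp [h, pvPsum, Prod.ext_iff] <;>
        first
          | omega
          | (rw [if_neg (by omega)] <;> omega)
          | (rw [if_pos (by omega)] <;> omega)

-- the reversal identity: odd-position sum after reversing the middle block
lemma pvCore (u seg w : List Int) :
    (pvPsum (u ++ seg.reverse ++ w)).2 =
      (pvPsum (u ++ seg ++ w)).2 - ((pvPsum (u ++ seg)).2 - (pvPsum u).2)
      + (if (u.length + (u.length + seg.length)) % 2 = 1
         then (pvPsum (u ++ seg)).2 - (pvPsum u).2
         else (pvPsum (u ++ seg)).1 - (pvPsum u).1) := by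
  simp only [pvPsum_append, pvPsum_reverse, List.length_append, List.length_reverse]
  split_ifs <;> simp_all <;> omega

-- characterisation of B's prefix-sum pass
lemma pvEO (Arr : List Int) :
    (PySem.List.enumerate Arr).foldl pvStep ([0], [0], 0, 0) =
      ((List.range (Arr.length + 1)).map (fun t => (pvPsum (Arr.take t)).1),
       (List.range (Arr.length + 1)).map (fun t => (pvPsum (Arr.take t)).2),
       (pvPsum Arr).1, (pvPsum Arr).2) := by
  induction Arr using List.reverseRecOn with
  | nil => simp [PySem.List.enumerate, pvPsum, List.range_succ]
  | append_singleton l x ih =>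
      have h1 : (List.range (l.length + 1 + 1)).map (fun t => (pvPsum ((l ++ [x]).take t)).1)
          = (List.range (l.length + 1)).map (fun t => (pvPsum (l.take t)).1)
            ++ [(pvPsum (l ++ [x])).1] := by
        rw [List.range_succ, List.map_append]
        congr 1
        · exact List.map_congr_left (fun t ht => by
            rw [List.take_append_of_le_length (by rw [List.mem_range] at ht; omega)])
        · rw [List.map_singleton, List.take_of_length_le (by simp)]
      have h2 : (List.range (l.length + 1 + 1)).map (fun t => (pvPsum ((l ++ [x]).take t)).2)
          = (List.range (l.length + 1)).map (fun t => (pvPsum (l.take t)).2)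
            ++ [(pvPsum (l ++ [x])).2] := by
        rw [List.range_succ, List.map_append]
        congr 1
        · exact List.map_congr_left (fun t ht => by
            rw [List.take_append_of_le_length (by rw [List.mem_range] at ht; omega)])
        · rw [List.map_singleton, List.take_of_length_le (by simp)]
      have hx : PySem.List.enumerate [x] (0 + (l.length : Int)) = [((l.length : Int), x)] := by
        simp [PySem.List.enumerate_cons, PySem.List.enumerate_nil]
      rw [PySem.List.enumerate_append, List.foldl_append, ih, hx,
        List.length_append, List.length_singleton, h1, h2]
      simp only [List.foldl_cons, List.foldl_nil, pvStep]
      rcases Nat.mod_two_eq_zero_or_one l.length with h | h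
      · rw [if_pos (by rw [PySem.Int.mod_eq_emod_of_pos (by norm_num : (0:Int) < 2)]; omega)]
        simp [Prod.ext_iff, pvPsum_append, h, pvPsum]
      · rw [if_neg (by rw [PySem.Int.mod_eq_emod_of_pos (by norm_num : (0:Int) < 2)]; omega)]
        simp [Prod.ext_iff, pvPsum_append, h, pvPsum]


-- proof-side forms of the two inner terms
def pvCA (Arr : List Int) (i j : Int) : Int :=
  let b : List Int := if i > 0 then PySem.List.slice Arr none (some i) else []
  let a : List Int := (PySem.List.slice Arr (some i) (some j)).reverse
  let Lst : List Int := b ++ a ++ PySem.List.slice Arr (some j) none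
  (PySem.List.pyRange 0 (Lst.length : Int) 1).foldl
    (fun c k => if PySem.Int.mod k 2 ≠ 0 then c + PySem.List.pyGetD Lst k 0 else c) 0

def pvTB (Arr : List Int) (i j : Int) : Int :=
  let ii := (min i (Arr.length : Int)).toNat
  let jj := (min j (Arr.length : Int)).toNat
  let odd_seg := (pvPsum (Arr.take jj)).2 - (pvPsum (Arr.take ii)).2
  let new_seg := if (ii + jj) % 2 = 1 then odd_seg
    else (pvPsum (Arr.take jj)).1 - (pvPsum (Arr.take ii)).1
  (pvPsum Arr).2 - odd_seg + new_seg

-- the pointwise equality of the two inner terms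
lemma pvTerm (Arr : List Int) (i j : Int) (h0 : 0 ≤ i) (hij : i ≤ j) :
    pvCA Arr i j = pvTB Arr i j := by
  have hb : (if i > 0 then PySem.List.slice Arr none (some i) else []) = Arr.take i.toNat := by
    by_cases hi : i > 0
    · rw [if_pos hi, PySem.List.slice_to Arr (le_of_lt hi)]
    · rw [if_neg hi]
      have hz : i = 0 := by omega
      simp [hz]
  unfold pvCA
  rw [hb, PySem.List.slice_toNat Arr h0 (by omega), PySem.List.slice_from Arr (by omega), pvOddScan]
  set u := Arr.take i.toNat with hu
  set seg := List.take (j.toNat - i.toNat) (List.drop i.toNat Arr) with hseg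
  set w := List.drop j.toNat Arr with hw
  have hj : u ++ seg = Arr.take j.toNat := by
    rw [hu, hseg, ← List.take_add]
    congr 1
    omega
  have hA : u ++ seg ++ w = Arr := by
    rw [hj, hw, List.take_append_drop]
  have hlu : u.length = (min i (Arr.length : Int)).toNat := by
    rw [hu, List.length_take]; omega
  have hluv : u.length + seg.length = (min j (Arr.length : Int)).toNat := by
    have hlj := congrArg List.length hj
    simp only [List.length_append, List.length_take] at hlj
    omega
  have e3 : Arr.take ((min i (Arr.length : Int)).toNat) = u := by
    have h' : (min i (Arr.length : Int)).toNat = min i.toNat Arr.length := by omega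
    rw [hu, h', ← List.take_eq_take_min]
  have e2 : Arr.take ((min j (Arr.length : Int)).toNat) = u ++ seg := by
    have h' : (min j (Arr.length : Int)).toNat = min j.toNat Arr.length := by omega
    rw [hj, h', ← List.take_eq_take_min]
  rw [pvCore u seg w]
  unfold pvTB
  simp only [e2, e3]
  rw [← hlu, ← hluv, hA]

lemma pvA_eq (N : Int) (Arr : List Int) :
    calculateMaxSum N Arr =
      (PySem.List.max?
        ((PySem.List.pyRange 0 N 1).flatMap
          (fun i => (PySem.List.pyRange i (N + 1) 1).map (pvCA Arr i)))
        (fun y => y)).getD 0 := by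
  unfold calculateMaxSum
  congr 1
  rw [PySem.List.foldl_congr_mem _ _
    (fun Sum i => Sum ++ (PySem.List.pyRange i (N + 1) 1).map (pvCA Arr i)) _
    (fun acc i _ => by
      show List.foldl (fun Sum j => Sum ++ [pvCA Arr i j]) acc (PySem.List.pyRange i (N + 1) 1)
        = acc ++ (PySem.List.pyRange i (N + 1) 1).map (pvCA Arr i)
      exact PySem.List.foldl_append_singleton_eq_map (pvCA Arr i) (PySem.List.pyRange i (N + 1) 1) acc),
    PySem.List.foldl_append_eq_flatMap]
  simp

lemma pvGetPrefix (f : Nat → Int) (n : Nat) (q : Int) (h0 : 0 ≤ q) :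
    PySem.List.pyGetD ((List.range (n + 1)).map (fun t => f t)) (min q (n : Int)) 0
      = f ((min q (n : Int)).toNat) := by
  rw [PySem.List.pyGetD_eq_getElem _ 0 (by omega)
    (by simp only [List.length_map, List.length_range]; omega)]
  simp

lemma pvInner_eq (Arr : List Int) (best i j : Int) (h0 : 0 ≤ i) (hij : i ≤ j) :
    pvInner ((List.range (Arr.length + 1)).map (fun t => (pvPsum (Arr.take t)).1))
            ((List.range (Arr.length + 1)).map (fun t => (pvPsum (Arr.take t)).2))
            ((pvPsum Arr).2) (Arr.length : Int) best i j
      = max best (pvTB Arr i j) := by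
  simp only [pvInner, pvTB]
  rw [pvGetPrefix (fun t => (pvPsum (Arr.take t)).2) Arr.length j (by omega),
      pvGetPrefix (fun t => (pvPsum (Arr.take t)).2) Arr.length i h0,
      pvGetPrefix (fun t => (pvPsum (Arr.take t)).1) Arr.length j (by omega),
      pvGetPrefix (fun t => (pvPsum (Arr.take t)).1) Arr.length i h0]
  have hcond : (PySem.Int.mod (min i (Arr.length : Int) + min j (Arr.length : Int)) 2 = 1)
      ↔ (((min i (Arr.length : Int)).toNat + (min j (Arr.length : Int)).toNat) % 2 = 1) := by
    rw [PySem.Int.mod_eq_emod_of_pos (by norm_num : (0:Int) < 2)]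
    omega
  simp only [hcond]
  split_ifs <;> omega

lemma pvB_eq (N : Int) (Arr : List Int) :
    calculateMaxSum_alt N Arr =
      ((PySem.List.pyRange 0 N 1).flatMap
        (fun i => (PySem.List.pyRange i (N + 1) 1).map (pvTB Arr i))).foldl
        max (pvPsum Arr).2 := by
  simp only [calculateMaxSum_alt, pvEO, List.foldl_flatMap, List.foldl_map]
  apply PySem.List.foldl_congr_mem
  intro best i hi
  apply PySem.List.foldl_congr_mem
  intro acc j hj
  rw [PySem.List.mem_pyRange_one] at hi hj
  exact pvInner_eq Arr acc i j hi.1 (by omega)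

lemma pvTB_zero (Arr : List Int) : pvTB Arr 0 0 = (pvPsum Arr).2 := by
  simp [pvTB]

-- ===== VERDICT (by name: the statement is the Claim_ definition above) =====
theorem calculateMaxSum_spec : Claim_equal_calculateMaxSum := by
  unfold Claim_equal_calculateMaxSum
  intro N Arr _ hpre
  unfold Spec_calculateMaxSum
  unfold Pre_calculateMaxSum at hpre
  rw [pvA_eq, pvB_eq]
  have hflat : ((PySem.List.pyRange 0 N 1).flatMap
      (fun i => (PySem.List.pyRange i (N + 1) 1).map (pvCA Arr i)))
      = ((PySem.List.pyRange 0 N 1).flatMap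
      (fun i => (PySem.List.pyRange i (N + 1) 1).map (pvTB Arr i))) := by
    apply List.flatMap_congr
    intro i hi
    apply List.map_congr_left
    intro j hj
    rw [PySem.List.mem_pyRange_one] at hi hj
    exact pvTerm Arr i j hi.1 hj.1
  rw [hflat, PySem.List.pyRange_one_cons (show (0:Int) < N by omega), List.flatMap_cons,
    PySem.List.pyRange_one_cons (show (0:Int) < N + 1 by omega), List.map_cons,
    List.cons_append, PySem.List.max?_id_cons, Option.getD_some, List.foldl_cons,
    pvTB_zero, max_self]
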